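-- pv_equiv track=rewrite | github.com/Juspadabuspa/Projaaaaa | wait.py | _get_symptom_severity
-- ===== SOURCE A (Python) =====
-- from typing import List, Dict, Optional, Tuple
--
-- def _get_symptom_severity(symptoms: List[str]) -> int:
--     """Calculate severity score from symptoms"""
--     severity_map = {
--         'chest_pain': 9, 'difficulty_breathing': 8, 'severe_headache': 7,
--         'high_fever': 6, 'persistent_cough': 4, 'mild_headache': 2,
--         'fever': 5, 'cough': 3, 'fatigue': 3, 'nausea': 2
--     }
--
--     max_severity = 0
--     for symptom in symptoms:
--         if symptom in severity_map:
--             max_severity = max(max_severity, severity_map[symptom])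
--
--     return max_severity if max_severity > 0 else 3  # Default mild severity
-- ===== SOURCE B (Python) =====
-- _RANKED = (
--     ('chest_pain', 9), ('difficulty_breathing', 8), ('severe_headache', 7),
--     ('high_fever', 6), ('fever', 5), ('persistent_cough', 4),
--     ('cough', 3), ('fatigue', 3), ('mild_headache', 2), ('nausea', 2),
-- )
--
-- def _get_symptom_severity(symptoms):
--     """Calculate severity score from symptoms"""
--     present = set(symptoms)
--     for symptom, severity in _RANKED:
--         if symptom in present:
--             return severity
--     return 3  # Default mild severity
-- ===== Notes on version B (the rewrite author's own statement) =====
-- stated objective: idiomatic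
-- what changed: B inverts the traversal: instead of scanning the symptom list accumulating a running max over dict lookups, it builds a set of the symptoms once and walks the severity table sorted by severity descending, returning the first severity whose symptom is present (default 3 if none).
import Mathlib
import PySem

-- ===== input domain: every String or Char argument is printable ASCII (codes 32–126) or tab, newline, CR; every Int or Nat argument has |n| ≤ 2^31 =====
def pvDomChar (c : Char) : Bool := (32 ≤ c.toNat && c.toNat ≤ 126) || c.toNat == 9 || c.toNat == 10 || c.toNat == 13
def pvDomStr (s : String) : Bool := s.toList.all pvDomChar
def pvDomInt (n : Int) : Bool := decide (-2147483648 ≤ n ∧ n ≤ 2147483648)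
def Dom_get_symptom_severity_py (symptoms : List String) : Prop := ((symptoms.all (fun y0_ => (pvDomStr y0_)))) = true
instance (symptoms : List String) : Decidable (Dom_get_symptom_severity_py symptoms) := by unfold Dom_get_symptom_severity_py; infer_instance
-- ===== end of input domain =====

-- B replaces A's scan-the-symptoms-and-accumulate-a-max loop by a single walk down the
-- severity table sorted descending, returning the first severity whose symptom is present
-- in a set built from the input (objective: idiomatic; not faster).

-- ===== PORT A =====
def pvSeverityMap : PySem.Dict String Int :=
  PySem.Dict.ofList [("chest_pain", 9), ("difficulty_breathing", 8), ("severe_headache", 7),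
    ("high_fever", 6), ("persistent_cough", 4), ("mild_headache", 2),
    ("fever", 5), ("cough", 3), ("fatigue", 3), ("nausea", 2)]

-- the loop body: 'if symptom in severity_map: max_severity = max(max_severity, severity_map[symptom])'
def pvF (acc : Int) (s : String) : Int :=
  if pvSeverityMap.contains s then max acc ((pvSeverityMap.get? s).getD 0) else acc

def get_symptom_severity_py (symptoms : List String) : Int :=
  let max_severity := symptoms.foldl pvF 0
  if max_severity > 0 then max_severity else 3

-- ===== PORT B =====
def pvRanked : List (String × Int) :=
  [("chest_pain", 9), ("difficulty_breathing", 8), ("severe_headache", 7), ("high_fever", 6),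
   ("fever", 5), ("persistent_cough", 4), ("cough", 3), ("fatigue", 3),
   ("mild_headache", 2), ("nausea", 2)]

-- the for-loop with early return over the ranked table
def pvScanRanked (present : PySem.Set String) : List (String × Int) → Int
  | [] => 3
  | (k, v) :: rest => if present.contains k then v else pvScanRanked present rest

def get_symptom_severity_py_alt (symptoms : List String) : Int :=
  pvScanRanked (PySem.Set.ofList symptoms) pvRanked

-- ===== PRECONDITION & SPEC =====
def Spec_get_symptom_severity_py (symptoms : List String) (out : Int) : Prop := out = get_symptom_severity_py_alt symptoms
instance (symptoms : List String) (out : Int) : Decidable (Spec_get_symptom_severity_py symptoms out) := by unfold Spec_get_symptom_severity_py; infer_instance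

-- ===== CLAIM (what is proved, stated in full; the proofs are below) =====
def Claim_equal_get_symptom_severity_py : Prop := ∀ (symptoms : List String), Dom_get_symptom_severity_py symptoms → Spec_get_symptom_severity_py symptoms (get_symptom_severity_py symptoms)

-- ===== LEMMAS AND PROOFS =====

-- per-symptom contribution of A's loop
def pvG (s : String) : Int :=
  if pvSeverityMap.contains s then (pvSeverityMap.get? s).getD 0 else 0

def pvInd (l : List String) (k : String) (v : Int) : Int := if l.contains k then v else 0

-- the value of A's accumulator after the whole loop, as a max over the ten keys
def pvH (l : List String) : Int :=
  max (pvInd l "chest_pain" 9) (max (pvInd l "difficulty_breathing" 8)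
    (max (pvInd l "severe_headache" 7) (max (pvInd l "high_fever" 6)
    (max (pvInd l "fever" 5) (max (pvInd l "persistent_cough" 4)
    (max (pvInd l "cough" 3) (max (pvInd l "fatigue" 3)
    (max (pvInd l "mild_headache" 2) (pvInd l "nausea" 2)))))))))

lemma pvF_max (a b : Int) (s : String) : pvF (max a b) s = max a (pvF b s) := by
  unfold pvF; split_ifs
  · exact max_assoc a b _
  · rfl

lemma foldl_pvF_max (l : List String) (a : Int) : ∀ b, l.foldl pvF (max a b) = max a (l.foldl pvF b) := by
  induction l with
  | nil => intro b; rfl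
  | cons s l ih => intro b; simp only [List.foldl_cons, pvF_max, ih]

lemma pvF_zero (s : String) : pvF 0 s = max (pvG s) 0 := by
  unfold pvF pvG; split_ifs with h
  · exact max_comm 0 _
  · simp

lemma ind_cons (s k : String) (v : Int) (hv : 0 ≤ v) (l : List String) :
    pvInd (s :: l) k v = max (if s = k then v else 0) (pvInd l k v) := by
  unfold pvInd
  by_cases h : s = k <;> by_cases hc : k ∈ l <;>
    simp [h, hc, hv, eq_comm]

lemma pvG_chain (s : String) :
    pvG s = max (if s = "chest_pain" then (9:Int) else 0) (max (if s = "difficulty_breathing" then (8:Int) else 0)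
      (max (if s = "severe_headache" then (7:Int) else 0) (max (if s = "high_fever" then (6:Int) else 0)
      (max (if s = "fever" then (5:Int) else 0) (max (if s = "persistent_cough" then (4:Int) else 0)
      (max (if s = "cough" then (3:Int) else 0) (max (if s = "fatigue" then (3:Int) else 0)
      (max (if s = "mild_headache" then (2:Int) else 0) (if s = "nausea" then (2:Int) else 0))))))))) := by
  by_cases h1 : s = "chest_pain"; · subst h1; decide
  by_cases h2 : s = "difficulty_breathing"; · subst h2; decide
  by_cases h3 : s = "severe_headache"; · subst h3; decide
  by_cases h4 : s = "high_fever"; · subst h4; decide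
  by_cases h5 : s = "fever"; · subst h5; decide
  by_cases h6 : s = "persistent_cough"; · subst h6; decide
  by_cases h7 : s = "cough"; · subst h7; decide
  by_cases h8 : s = "fatigue"; · subst h8; decide
  by_cases h9 : s = "mild_headache"; · subst h9; decide
  by_cases h10 : s = "nausea"; · subst h10; decide
  have hm : pvSeverityMap = PySem.Dict.mk [("chest_pain", 9), ("difficulty_breathing", 8),
      ("severe_headache", 7), ("high_fever", 6), ("persistent_cough", 4), ("mild_headache", 2),
      ("fever", 5), ("cough", 3), ("fatigue", 3), ("nausea", 2)] := by rfl
  unfold pvG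
  rw [hm]
  simp [PySem.Dict.contains_mk, Ne.symm h1, Ne.symm h2, Ne.symm h3, Ne.symm h4, Ne.symm h5,
    Ne.symm h6, Ne.symm h7, Ne.symm h8, Ne.symm h9, Ne.symm h10, h1, h2, h3, h4, h5, h6, h7, h8,
    h9, h10]

lemma pvH_cons (s : String) (l : List String) : pvH (s :: l) = max (pvG s) (pvH l) := by
  unfold pvH
  rw [ind_cons s _ _ (by norm_num), ind_cons s _ _ (by norm_num), ind_cons s _ _ (by norm_num),
      ind_cons s _ _ (by norm_num), ind_cons s _ _ (by norm_num), ind_cons s _ _ (by norm_num),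
      ind_cons s _ _ (by norm_num), ind_cons s _ _ (by norm_num), ind_cons s _ _ (by norm_num),
      ind_cons s _ _ (by norm_num), pvG_chain]
  ac_rfl

lemma foldl_pvF_eq_pvH (l : List String) : l.foldl pvF 0 = pvH l := by
  induction l with
  | nil => decide
  | cons s l ih =>
    rw [List.foldl_cons, pvF_zero, foldl_pvF_max, ih, pvH_cons]

lemma alt_eq_ifchain (symptoms : List String) :
    get_symptom_severity_py_alt symptoms =
      (if symptoms.contains "chest_pain" then (9:Int) else if symptoms.contains "difficulty_breathing" then 8
       else if symptoms.contains "severe_headache" then 7 else if symptoms.contains "high_fever" then 6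
       else if symptoms.contains "fever" then 5 else if symptoms.contains "persistent_cough" then 4
       else if symptoms.contains "cough" then 3 else if symptoms.contains "fatigue" then 3
       else if symptoms.contains "mild_headache" then 2 else if symptoms.contains "nausea" then 2 else 3) := by
  simp [get_symptom_severity_py_alt, pvRanked, pvScanRanked]

lemma pvFinal (c1 c2 c3 c4 c5 c6 c7 c8 c9 c10 : Bool) :
    (if (max (if c1 then (9:Int) else 0) (max (if c2 then (8:Int) else 0)
      (max (if c3 then (7:Int) else 0) (max (if c4 then (6:Int) else 0)
      (max (if c5 then (5:Int) else 0) (max (if c6 then (4:Int) else 0)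
      (max (if c7 then (3:Int) else 0) (max (if c8 then (3:Int) else 0)
      (max (if c9 then (2:Int) else 0) (if c10 then (2:Int) else 0)))))))))) > 0
     then (max (if c1 then (9:Int) else 0) (max (if c2 then (8:Int) else 0)
      (max (if c3 then (7:Int) else 0) (max (if c4 then (6:Int) else 0)
      (max (if c5 then (5:Int) else 0) (max (if c6 then (4:Int) else 0)
      (max (if c7 then (3:Int) else 0) (max (if c8 then (3:Int) else 0)
      (max (if c9 then (2:Int) else 0) (if c10 then (2:Int) else 0))))))))))
     else 3)
    = (if c1 then (9:Int) else if c2 then 8 else if c3 then 7 else if c4 then 6 else if c5 then 5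
       else if c6 then 4 else if c7 then 3 else if c8 then 3 else if c9 then 2 else if c10 then 2 else 3) := by
  revert c1 c2 c3 c4 c5 c6 c7 c8 c9 c10; decide

-- ===== VERDICT (by name: the statement is the Claim_ definition above) =====
theorem get_symptom_severity_py_spec : Claim_equal_get_symptom_severity_py := by
  intro symptoms _
  unfold Spec_get_symptom_severity_py
  rw [alt_eq_ifchain]
  show (if symptoms.foldl pvF 0 > 0 then symptoms.foldl pvF 0 else 3) = _
  rw [foldl_pvF_eq_pvH]
  unfold pvH pvInd
  exact pvFinal _ _ _ _ _ _ _ _ _ _
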